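-- pv_equiv track=rewrite | github.com/mnmnc/MachineLearning_Maze | dead_end_filler.py | fix_graph_frames
-- ===== SOURCE A (Python) =====
-- def fix_graph_frames(graph):
-- 	graph_trans = []
-- 	for i in range(len(graph)):
-- 		xs = []
-- 		for j in range(len(graph[i])):
-- 			xs.append(graph[j][i])
-- 		graph_trans.append(xs)
--
-- 	for i in range(len(graph_trans)):
-- 		if i == len(graph_trans)-1:
-- 			for j in range(len(graph_trans[i])):
-- 				graph_trans[i][j] = 1
-- 		for j in range(len(graph_trans[i])):
-- 			if j == len(graph_trans[i])-1:
-- 				graph_trans[i][j] = 1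
--
-- 	return graph_trans
-- ===== SOURCE B (Python) =====
-- def fix_graph_frames(graph):
--     n = len(graph)
--     out = []
--     for i, row in enumerate(graph):
--         m = len(row)
--         if i == n - 1:
--             out.append([1] * m)
--         elif m == 0:
--             out.append([])
--         else:
--             out.append([graph[j][i] for j in range(m - 1)] + [1])
--     return out
-- ===== Notes on version B (the rewrite author's own statement) =====
-- stated objective: simpler
-- what changed: B computes each output row directly in one pass (all-ones last row; otherwise a prefix of the transposed column followed by 1) instead of A's two phases of building the full transpose and then overwriting the last row and each row's last element.
import Mathlib
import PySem

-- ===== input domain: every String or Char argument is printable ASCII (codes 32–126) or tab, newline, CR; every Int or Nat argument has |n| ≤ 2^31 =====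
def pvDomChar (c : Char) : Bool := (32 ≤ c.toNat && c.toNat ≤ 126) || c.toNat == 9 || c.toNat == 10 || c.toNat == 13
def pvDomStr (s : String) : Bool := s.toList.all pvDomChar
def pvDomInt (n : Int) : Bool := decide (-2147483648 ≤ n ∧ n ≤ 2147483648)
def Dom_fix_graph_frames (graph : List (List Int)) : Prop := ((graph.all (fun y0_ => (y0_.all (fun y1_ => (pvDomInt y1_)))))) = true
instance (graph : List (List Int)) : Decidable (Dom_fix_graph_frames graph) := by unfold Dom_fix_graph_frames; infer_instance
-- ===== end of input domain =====

-- B builds each output row directly (all-ones last row, prefix-of-transpose ++ [1] otherwise)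
-- in one pass instead of A's transpose-then-overwrite two-phase construction; objective: simpler.

-- ===== PORT A =====
def fix_graph_frames (graph : List (List Int)) : List (List Int) :=
  -- first loop: build the transpose-shaped list graph_trans
  let graph_trans := (List.range graph.length).map (fun (i : Nat) =>
    (List.range (graph.getD i []).length).map (fun (j : Nat) =>
      PySem.List.pyGetD (PySem.List.pyGetD graph (j : Int) []) (i : Int) 0))
  -- second loop: in-place overwrites, expressed as rebuilding each row
  (List.range graph_trans.length).map (fun i =>
    let row := graph_trans.getD i []
    let row2 := if i = graph_trans.length - 1 then row.map (fun _ => (1 : Int)) else row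
    (List.range row2.length).map (fun j => if j = row2.length - 1 then (1 : Int) else row2.getD j 0))

-- ===== PORT B =====
def fix_graph_frames_alt (graph : List (List Int)) : List (List Int) :=
  let n := graph.length
  (PySem.List.enumerate graph).map (fun p =>
    let m := p.2.length
    if p.1 = (n : Int) - 1 then List.replicate m 1
    else if m = 0 then []
    else ((List.range (m - 1)).map (fun (j : Nat) =>
            PySem.List.pyGetD (PySem.List.pyGetD graph (j : Int) []) p.1 0)) ++ [1])

-- ===== PRECONDITION & SPEC =====
-- Pre_: exactly the inputs on which Python A returns (no IndexError): every transposed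
-- access graph[j][i] taken by A is in range.
def Pre_fix_graph_frames (graph : List (List Int)) : Prop :=
  ∀ i < graph.length, ∀ j < (graph.getD i []).length,
    j < graph.length ∧ i < (graph.getD j []).length
instance (graph : List (List Int)) : Decidable (Pre_fix_graph_frames graph) := by
  unfold Pre_fix_graph_frames; infer_instance
def pvWitness_fix_graph_frames : List (List Int) := [[0, 2], [3, 0]]
def Spec_fix_graph_frames (graph : List (List Int)) (out : List (List Int)) : Prop := out = fix_graph_frames_alt graph
instance (graph : List (List Int)) (out : List (List Int)) : Decidable (Spec_fix_graph_frames graph out) := by unfold Spec_fix_graph_frames; infer_instance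

-- ===== CLAIM (what is proved, stated in full; the proofs are below) =====
def Claim_equal_fix_graph_frames : Prop := ∀ (graph : List (List Int)), Dom_fix_graph_frames graph → Pre_fix_graph_frames graph → Spec_fix_graph_frames graph (fix_graph_frames graph)

-- ===== LEMMAS AND PROOFS =====

theorem lastone (m : Nat) (hm : 0 < m) (f : Nat → Int) :
    (List.range m).map (fun j => if j = m - 1 then (1 : Int) else f j)
      = (List.range (m - 1)).map f ++ [1] := by
  conv_lhs => rw [show m = (m - 1) + 1 by omega, List.range_succ]
  rw [List.map_append]
  congr 1
  · exact List.map_congr_left fun j hj => by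
      rw [if_neg (by simp at hj; omega)]
  · simp

theorem fix_graph_frames_ext (graph : List (List Int)) :
    fix_graph_frames graph = fix_graph_frames_alt graph := by
  unfold fix_graph_frames fix_graph_frames_alt
  apply List.ext_getElem
  · simp [PySem.List.length_enumerate]
  · intro k h1 h2
    simp only [List.length_map, List.length_range] at h1
    simp only [List.getElem_map, List.getElem_range, PySem.List.getElem_enumerate,
      List.length_map, List.length_range, zero_add]
    rw [List.getD_eq_getElem _ _ (by simpa using h1)]
    simp only [List.getElem_map, List.getElem_range,
      List.getD_eq_getElem graph [] h1]
    by_cases hk : k = graph.length - 1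
    · rw [if_pos hk, if_pos (by omega)]
      apply List.ext_getElem
      · simp
      · intro j hj1 hj2
        simp only [List.length_map, List.length_range] at hj1
        simp only [List.getElem_map, List.getElem_range, List.getElem_replicate]
        by_cases hj : j = graph[k].length - 1
        · rw [if_pos (by simpa using hj)]
        · rw [if_neg (by simpa using hj),
            List.getD_eq_getElem _ _ (by simpa using hj1)]
          simp
    · rw [if_neg hk, if_neg (by omega)]
      by_cases hm : graph[k].length = 0
      · simp [hm]
      · rw [if_neg hm]
        simp only [List.length_map, List.length_range]
        rw [lastone _ (by omega)]
        congr 1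
        apply List.map_congr_left
        intro j hj
        simp only [List.mem_range] at hj
        rw [List.getD_eq_getElem _ _ (by simp; omega)]
        simp

-- ===== VERDICT (by name: the statement is the Claim_ definition above) =====
theorem fix_graph_frames_spec : Claim_equal_fix_graph_frames := by
  intro graph _ _
  exact fix_graph_frames_ext graph
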